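-- pv_equiv track=rewrite | github.com/loopy-dev/algorithm-v2 | programmers/lv2/뉴스_클러스터링.py | slice_string
-- ===== SOURCE A (Python) =====
-- def slice_string(string):
--     ret = []
--     for i in range(len(string) - 1):
--         flag = True
--         sliced = string[i : i + 2]
--
--         for c in sliced:
--             if ord(c) < 97 or ord(c) > 122:
--                 flag = False
--                 break
--
--         if flag:
--             ret.append(sliced)
--     return ret
-- ===== SOURCE B (Python) =====
-- def slice_string(string):
--     out = []
--     i, n = 0, len(string)
--     while i < n:
--         if 'a' <= string[i] <= 'z':
--             j = i + 1
--             while j < n and 'a' <= string[j] <= 'z':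
--                 j += 1
--             run = string[i:j]
--             out.extend(x + y for x, y in zip(run, run[1:]))
--             i = j
--         else:
--             i += 1
--     return out
-- ===== Notes on version B (the rewrite author's own statement) =====
-- stated objective: alternative
-- what changed: Instead of sliding a 2-char window over the whole string and validating each window, B scans once for maximal runs of lowercase letters and emits the adjacent pairs inside each run.
import Mathlib
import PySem

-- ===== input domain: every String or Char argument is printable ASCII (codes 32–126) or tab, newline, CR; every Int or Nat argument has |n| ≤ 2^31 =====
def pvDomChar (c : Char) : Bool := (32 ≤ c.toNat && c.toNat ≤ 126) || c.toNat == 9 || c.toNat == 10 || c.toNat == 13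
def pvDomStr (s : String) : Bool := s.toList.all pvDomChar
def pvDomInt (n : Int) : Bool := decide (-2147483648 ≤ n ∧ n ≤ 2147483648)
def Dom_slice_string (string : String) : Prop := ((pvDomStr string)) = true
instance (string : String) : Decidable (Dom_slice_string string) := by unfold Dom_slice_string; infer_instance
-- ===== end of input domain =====

-- B replaces A's slide-a-2-window-and-validate loop by a scan for maximal lowercase runs,
-- emitting the adjacent pairs inside each run (alternative decomposition, same cost).

-- ===== PORT A =====
-- inner 'for c in sliced: if ord(c) < 97 or ord(c) > 122: flag = False; break'
def pvLowerCheck : List Char → Bool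
  | [] => true
  | c :: rest => if c.toNat < 97 || 122 < c.toNat then false else pvLowerCheck rest

def slice_string (string : String) : List String :=
  let cs := string.toList
  (PySem.List.pyRange 0 ((cs.length : Int) - 1) 1).foldl
    (fun ret i =>
      let sliced := PySem.List.slice cs (some i) (some (i + 2))
      if pvLowerCheck sliced then ret ++ [String.ofList sliced] else ret)
    []

-- ===== PORT B =====
-- 'a' <= c <= 'z'
def pvIsLow (c : Char) : Bool := 97 ≤ c.toNat && c.toNat ≤ 122

-- out.extend(x + y for x, y in zip(run, run[1:]))
def pvBigrams (run : List Char) : List String :=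
  (run.zip run.tail).map (fun p => String.ofList [p.1, p.2])

-- outer while: skip non-lowercase chars; at a lowercase char take the maximal run
-- (inner while = takeWhile), emit its bigrams, continue right after the run
def pvLowRuns : List Char → List String
  | [] => []
  | c :: rest =>
    if pvIsLow c then
      pvBigrams (c :: rest.takeWhile pvIsLow) ++ pvLowRuns (rest.dropWhile pvIsLow)
    else pvLowRuns rest
termination_by cs => cs.length
decreasing_by
  · simpa using Nat.lt_succ_of_le (List.length_dropWhile_le pvIsLow rest)
  · simp

def slice_string_alt (string : String) : List String := pvLowRuns string.toList

-- ===== PRECONDITION & SPEC =====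
def Spec_slice_string (string : String) (out : List String) : Prop := out = slice_string_alt string
instance (string : String) (out : List String) : Decidable (Spec_slice_string string out) := by unfold Spec_slice_string; infer_instance

-- ===== CLAIM (what is proved, stated in full; the proofs are below) =====
def Claim_equal_slice_string : Prop := ∀ (string : String), Dom_slice_string string → Spec_slice_string string (slice_string string)

-- ===== LEMMAS AND PROOFS =====

-- common reference form: adjacent pairs of the list that are both lowercase
def pvAdj : List Char → List String
  | a :: b :: rest => (if pvIsLow a && pvIsLow b then [String.ofList [a, b]] else []) ++ pvAdj (b :: rest)
  | _ => []

theorem pvLowerCheck_pair (a b : Char) :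
    pvLowerCheck [a, b] = (pvIsLow a && pvIsLow b) := by
  simp only [pvLowerCheck, pvIsLow]
  split_ifs with h1 h2 <;> simp_all <;> omega

-- index-based form of A's loop
def pvAIdx (cs : List Char) : List String :=
  ((List.range (cs.length - 1)).filter (fun k => pvLowerCheck ((cs.drop k).take 2))).map
    (fun k => String.ofList ((cs.drop k).take 2))

theorem slice_string_eq_idx (cs : List Char) :
    slice_string (String.ofList cs) = pvAIdx cs := by
  unfold slice_string pvAIdx
  simp only [String.toList_ofList]
  rw [PySem.List.pyRange_one, PySem.List.foldl_append_if]
  have hcast : ((cs.length : Int) - 1 - 0).toNat = cs.length - 1 := by omega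
  rw [hcast, List.filter_map, List.map_map, List.nil_append]
  have hfun : ∀ k : Nat,
      PySem.List.slice cs (some (k : Int)) (some ((k : Int) + 2)) = (cs.drop k).take 2 := by
    intro k
    have : ((k : Int) + 2) = ((k : Int) + ((2 : Nat) : Int)) := by push_cast; ring
    rw [this, PySem.List.slice_natCast_add]
  congr 1
  · funext k; simp [Function.comp, hfun k]
  · congr 1; funext k; simp [Function.comp, hfun k]

theorem idx_eq_adj (cs : List Char) : pvAIdx cs = pvAdj cs := by
  induction cs using pvAdj.induct with
  | case1 a b rest ih =>
    unfold pvAIdx pvAdj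
    have hlen : (a :: b :: rest).length - 1 = rest.length + 1 := by simp
    rw [hlen, List.range_succ_eq_map, List.filter_cons]
    have hdrop : ∀ k : Nat, ((a :: b :: rest).drop (k + 1)) = ((b :: rest).drop k) := by
      intro k; rfl
    have hf1 : ((fun k => String.ofList ((List.drop k (a :: b :: rest)).take 2)) ∘ Nat.succ)
        = (fun k => String.ofList ((List.drop k (b :: rest)).take 2)) := by
      funext k; simp [Function.comp, Nat.succ_eq_add_one, hdrop k]
    have hf2 : ((fun k => pvLowerCheck ((List.drop k (a :: b :: rest)).take 2)) ∘ Nat.succ)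
        = (fun k => pvLowerCheck ((List.drop k (b :: rest)).take 2)) := by
      funext k; simp [Function.comp, Nat.succ_eq_add_one, hdrop k]
    have htail :
        ((List.range rest.length).filter (fun k => pvLowerCheck ((List.drop k (b :: rest)).take 2))).map
          (fun k => String.ofList ((List.drop k (b :: rest)).take 2)) = pvAdj (b :: rest) := by
      rw [← ih]; unfold pvAIdx; simp
    simp only [List.drop_zero, show List.take 2 (a :: b :: rest) = [a, b] from rfl,
      pvLowerCheck_pair, List.filter_map, hf2]
    split_ifs with h
    · rw [List.map_cons, List.map_map, hf1, htail]; rfl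
    · rw [List.map_map, hf1, htail, List.nil_append]
  | case2 cs h =>
    match cs with
    | [] => rfl
    | [a] => rfl
    | a :: b :: rest => exact absurd rfl (h a b rest)

theorem adj_skip (c : Char) (rest : List Char) (h : pvIsLow c = false) :
    pvAdj (c :: rest) = pvAdj rest := by
  match rest with
  | [] => rfl
  | b :: t => simp [pvAdj, h]

theorem adj_run (c : Char) (h : pvIsLow c = true) (rest : List Char) :
    pvAdj (c :: rest) =
      pvBigrams (c :: rest.takeWhile pvIsLow) ++ pvAdj (rest.dropWhile pvIsLow) := by
  induction rest generalizing c with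
  | nil => simp [pvAdj, pvBigrams]
  | cons b t ih =>
    by_cases hb : pvIsLow b
    · simp only [List.takeWhile_cons, List.dropWhile_cons, hb, if_pos]
      rw [pvAdj, ih b hb]
      simp [pvBigrams, h, hb]
    · simp only [List.takeWhile_cons, List.dropWhile_cons, hb]
      simp only [Bool.not_eq_true] at hb
      rw [pvAdj]
      simp [pvBigrams, hb]

theorem alt_eq_adj (cs : List Char) : pvLowRuns cs = pvAdj cs := by
  induction cs using pvLowRuns.induct with
  | case1 => simp [pvLowRuns, pvAdj]
  | case2 c rest h ih => rw [pvLowRuns, if_pos h, ih, adj_run c h rest]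
  | case3 c rest h ih =>
    rw [pvLowRuns, if_neg h, ih, adj_skip c rest (by simpa using h)]

-- ===== VERDICT (by name: the statement is the Claim_ definition above) =====
theorem slice_string_spec : Claim_equal_slice_string := by
  intro s _
  unfold Spec_slice_string slice_string_alt
  rw [alt_eq_adj, ← idx_eq_adj, ← slice_string_eq_idx, String.ofList_toList]
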